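-- pv_equiv track=rewrite | github.com/baraloni/WebInformationRetrival | FinalProject/SimHash.py | permute_sig
-- ===== SOURCE A (Python) =====
-- def permute_sig(partition: list, sig_parts: list, per: list) -> int:
--     per = per[::-1]
--     res = 0
--     sizes = 0
--     for p in per:
--         res += sig_parts[p] << sizes
--         sizes += partition[p]
--     return res
-- ===== SOURCE B (Python) =====
-- def permute_sig(partition: list, sig_parts: list, per: list) -> int:
--     # Horner-style forward fold: shift the whole accumulator left by the current
--     # part's width and add the part; no reversal, no cumulative-offset variable.
--     res = 0
--     for p in per:
--         res = (res << partition[p]) + sig_parts[p]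
--     return res
-- ===== Notes on version B (the rewrite author's own statement) =====
-- stated objective: simpler
-- what changed: Replaces the reversed-order loop with a cumulative bit-offset accumulator by a forward Horner fold that shifts the single result accumulator by each part's width; no reversal and no second state variable.
-- outside the precondition, e.g. on permute_sig([-1], [5], [0]): A returns 5, B raises ValueError
import Mathlib
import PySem

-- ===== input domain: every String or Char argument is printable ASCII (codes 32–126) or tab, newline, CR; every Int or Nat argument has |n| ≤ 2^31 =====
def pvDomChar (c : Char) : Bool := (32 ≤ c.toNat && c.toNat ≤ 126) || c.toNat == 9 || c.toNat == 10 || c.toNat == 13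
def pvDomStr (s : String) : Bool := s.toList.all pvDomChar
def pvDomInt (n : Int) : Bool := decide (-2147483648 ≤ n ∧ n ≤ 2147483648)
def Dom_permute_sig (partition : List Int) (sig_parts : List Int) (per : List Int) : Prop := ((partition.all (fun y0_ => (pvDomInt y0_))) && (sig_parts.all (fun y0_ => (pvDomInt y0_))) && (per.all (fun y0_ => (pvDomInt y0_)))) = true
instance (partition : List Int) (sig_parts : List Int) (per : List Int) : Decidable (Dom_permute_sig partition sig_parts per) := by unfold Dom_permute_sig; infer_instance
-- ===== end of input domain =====

-- B replaces the reversed loop with a cumulative offset by a forward Horner fold (simpler; same cost).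

-- ===== PORT A =====
-- per[::-1] is PySem.List.slice? per none none (-1) (step -1 is never none, so getD []);
-- xs[p] is pyGetD (exact under Pre_: index in range); x << k is x <<< k.toNat, exact for
-- k ≥ 0 (Pre_ guarantees the cumulative sizes stays ≥ 0; Python raises ValueError otherwise).
def permute_sig (partition : List Int) (sig_parts : List Int) (per : List Int) : Int :=
  let perR := (PySem.List.slice? per none none (-1)).getD []
  (perR.foldl (fun (st : Int × Int) p =>
      (st.1 + (PySem.List.pyGetD sig_parts p 0) <<< st.2.toNat,
       st.2 + PySem.List.pyGetD partition p 0)) (0, 0)).1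

-- ===== PORT B =====
def permute_sig_alt (partition : List Int) (sig_parts : List Int) (per : List Int) : Int :=
  per.foldl (fun res p =>
      (res <<< (PySem.List.pyGetD partition p 0).toNat) + PySem.List.pyGetD sig_parts p 0) 0

-- ===== PRECONDITION & SPEC =====
-- Pre_ excludes negative partition widths among the used indices (Python's << raises
-- ValueError on a negative shift count; B shifts by each width individually, A only by
-- their running sums, so A can still return where B raises) and out-of-range indices
-- (both raise IndexError there).
def Pre_permute_sig (partition : List Int) (sig_parts : List Int) (per : List Int) : Prop :=
  ∀ p ∈ per, PySem.Raise.InRange partition.length p ∧ PySem.Raise.InRange sig_parts.length p ∧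
    0 ≤ PySem.List.pyGetD partition p 0

instance (partition : List Int) (sig_parts : List Int) (per : List Int) : Decidable (Pre_permute_sig partition sig_parts per) := by unfold Pre_permute_sig; infer_instance

def pvWitness_permute_sig : List Int × List Int × List Int := ([2, 1], [3, 1], [0, 1])

def Spec_permute_sig (partition : List Int) (sig_parts : List Int) (per : List Int) (out : Int) : Prop := out = permute_sig_alt partition sig_parts per
instance (partition : List Int) (sig_parts : List Int) (per : List Int) (out : Int) : Decidable (Spec_permute_sig partition sig_parts per out) := by unfold Spec_permute_sig; infer_instance

-- ===== CLAIM (what is proved, stated in full; the proofs are below) =====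
def Claim_equal_permute_sig : Prop := ∀ (partition : List Int) (sig_parts : List Int) (per : List Int), Dom_permute_sig partition sig_parts per → Pre_permute_sig partition sig_parts per → Spec_permute_sig partition sig_parts per (permute_sig partition sig_parts per)

-- ===== LEMMAS AND PROOFS =====

theorem pv_sum_nonneg (part : Int → Int) (l : List Int)
    (hpos : ∀ p ∈ l, 0 ≤ part p) : 0 ≤ (l.map part).sum := by
  induction l with
  | nil => simp
  | cons q t ih =>
      simp only [List.map_cons, List.sum_cons]
      have := hpos q (by simp)
      have := ih (fun p hp => hpos p (by simp [hp]))
      omega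

-- B's Horner fold from an arbitrary accumulator r.
theorem pv_horner (part sig : Int → Int) (l : List Int) (r : Int)
    (hpos : ∀ p ∈ l, 0 ≤ part p) :
    l.foldl (fun res p => res * 2 ^ (part p).toNat + sig p) r
      = r * 2 ^ ((l.map part).sum).toNat
        + l.foldl (fun res p => res * 2 ^ (part p).toNat + sig p) 0 := by
  induction l generalizing r with
  | nil => simp
  | cons q t ih =>
      have hq := hpos q (by simp)
      have ht : ∀ p ∈ t, 0 ≤ part p := fun p hp => hpos p (by simp [hp])
      have hS := pv_sum_nonneg part t ht
      simp only [List.foldl_cons, List.map_cons, List.sum_cons, zero_mul, zero_add]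
      rw [ih _ ht, ih (sig q) ht]
      have hsplit : ((part q + (t.map part).sum)).toNat
          = (part q).toNat + ((t.map part).sum).toNat := by omega
      rw [hsplit, pow_add]
      ring

-- A's reversed fold with the (result, cumulative-size) pair equals (B's fold, total size).
theorem pv_rev_fold (part sig : Int → Int) (l : List Int)
    (hpos : ∀ p ∈ l, 0 ≤ part p) :
    l.reverse.foldl (fun (st : Int × Int) p =>
        (st.1 + sig p * 2 ^ st.2.toNat, st.2 + part p)) (0, 0)
      = (l.foldl (fun res p => res * 2 ^ (part p).toNat + sig p) 0, (l.map part).sum) := by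
  induction l with
  | nil => simp
  | cons q t ih =>
      have hq := hpos q (by simp)
      have ht : ∀ p ∈ t, 0 ≤ part p := fun p hp => hpos p (by simp [hp])
      simp only [List.reverse_cons, List.foldl_append, List.foldl_cons, List.foldl_nil,
        ih ht, List.map_cons, List.sum_cons, zero_mul, zero_add]
      rw [pv_horner part sig t (sig q) ht, Prod.mk.injEq]
      exact ⟨by ring, by omega⟩

-- ===== VERDICT (by name: the statement is the Claim_ definition above) =====
theorem permute_sig_spec : Claim_equal_permute_sig := by
  intro partition sig_parts per _ hpre
  unfold Spec_permute_sig permute_sig permute_sig_alt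
  simp only [PySem.List.slice?_none_none_neg_one, Option.getD_some, Int.shiftLeft_eq]
  rw [pv_rev_fold (fun p => PySem.List.pyGetD partition p 0)
        (fun p => PySem.List.pyGetD sig_parts p 0) per
        (fun p hp => (hpre p hp).2.2)]
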